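-- pv_equiv track=rewrite | github.com/james-hr-burton/Cluster-Editing | main.py | has_unique_
-- ===== SOURCE A (Python) =====
-- def has_unique_(clique, graph):
--     counter = 0
--     for element in clique:
--         for clq in graph:
--             if clq != clique:
--                 if element in clq:
--                     counter += 1
--                     break
--     if counter == len(clique):
--         return False
--     elif counter < len(clique):
--         return True
-- ===== SOURCE B (Python) =====
-- def has_unique_(clique, graph):
--     others = set()
--     for clq in graph:
--         if clq != clique:
--             others.update(clq)
--     return any(e not in others for e in clique)
-- ===== Notes on version B (the rewrite author's own statement) =====
-- stated objective: faster
-- what changed: Instead of scanning the whole graph again for every clique element (with an inner 'element in clq' scan), B builds the set of all elements occurring in value-unequal cliques once and answers with a single membership pass over the clique.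
import Mathlib
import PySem

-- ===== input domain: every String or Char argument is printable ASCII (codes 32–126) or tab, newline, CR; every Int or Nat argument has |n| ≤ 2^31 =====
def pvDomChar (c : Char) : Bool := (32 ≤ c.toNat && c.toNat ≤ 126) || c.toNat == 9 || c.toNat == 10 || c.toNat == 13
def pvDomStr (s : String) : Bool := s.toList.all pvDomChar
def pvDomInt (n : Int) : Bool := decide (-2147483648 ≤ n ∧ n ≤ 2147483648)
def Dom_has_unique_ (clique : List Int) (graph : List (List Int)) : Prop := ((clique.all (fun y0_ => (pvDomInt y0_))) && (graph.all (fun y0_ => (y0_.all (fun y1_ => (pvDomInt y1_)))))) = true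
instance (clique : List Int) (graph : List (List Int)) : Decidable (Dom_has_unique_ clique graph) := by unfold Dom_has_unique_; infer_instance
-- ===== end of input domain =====

-- B replaces A's per-element rescans of the whole graph by one precomputed set of
-- elements of value-unequal cliques, then a single membership pass (objective: faster).

-- ===== PORT A =====
-- inner 'for clq in graph: if clq != clique: if element in clq: counter += 1; break'
-- (returns the contribution of one element: 1 on break, 0 if the loop falls through)
def pvLoopA (clique : List Int) (element : Int) : List (List Int) → Int
  | [] => 0
  | clq :: rest =>
      if clq ≠ clique then
        (if element ∈ clq then 1 else pvLoopA clique element rest)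
      else pvLoopA clique element rest

def has_unique_ (clique : List Int) (graph : List (List Int)) : Bool :=
  let counter := clique.foldl (fun c element => c + pvLoopA clique element graph) 0
  if counter = (clique.length : Int) then false
  else if counter < (clique.length : Int) then true
  else false  -- unreachable (counter ≤ len(clique) always; Python falls off the end here)

-- ===== PORT B =====
def has_unique__alt (clique : List Int) (graph : List (List Int)) : Bool :=
  let others := graph.foldl (fun s clq => if clq ≠ clique then PySem.Set.update s clq else s) PySem.Set.empty
  clique.any (fun e => !(PySem.Set.contains others e))

-- ===== PRECONDITION & SPEC =====
def Spec_has_unique_ (clique : List Int) (graph : List (List Int)) (out : Bool) : Prop := out = has_unique__alt clique graph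
instance (clique : List Int) (graph : List (List Int)) (out : Bool) : Decidable (Spec_has_unique_ clique graph out) := by unfold Spec_has_unique_; infer_instance

-- ===== CLAIM (what is proved, stated in full; the proofs are below) =====
def Claim_equal_has_unique_ : Prop := ∀ (clique : List Int) (graph : List (List Int)), Dom_has_unique_ clique graph → Spec_has_unique_ clique graph (has_unique_ clique graph)

-- ===== LEMMAS AND PROOFS =====

-- the property an element contributes 1 for in A / is in 'others' for in B
def pvElsewhere (clique : List Int) (graph : List (List Int)) (e : Int) : Bool :=
  graph.any (fun clq => decide (clq ≠ clique) && clq.contains e)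

theorem pvLoopA_eq (clique : List Int) (e : Int) (g : List (List Int)) :
    pvLoopA clique e g = if pvElsewhere clique g e then 1 else 0 := by
  induction g with
  | nil => simp [pvLoopA, pvElsewhere]
  | cons clq rest ih =>
      simp only [pvLoopA, pvElsewhere, List.any_cons]
      by_cases h1 : clq ≠ clique <;> by_cases h2 : e ∈ clq <;>
        simp [h1, h2, ih, pvElsewhere]

theorem pvFoldA_eq (clique : List Int) (graph : List (List Int)) (l : List Int) (n : Int) :
    l.foldl (fun c element => c + pvLoopA clique element graph) n
      = n + (l.countP (pvElsewhere clique graph) : Int) := by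
  induction l generalizing n with
  | nil => simp
  | cons e t ih =>
      rw [List.foldl_cons, ih, pvLoopA_eq, List.countP_cons]
      by_cases h : pvElsewhere clique graph e
      · simp only [h, if_pos]; push_cast; ring
      · simp [h]

theorem pvOthers_mem (clique : List Int) (graph : List (List Int)) (s : PySem.Set Int) (e : Int) :
    (e ∈ graph.foldl (fun s clq => if clq ≠ clique then PySem.Set.update s clq else s) s)
      ↔ e ∈ s ∨ pvElsewhere clique graph e := by
  induction graph generalizing s with
  | nil => simp [pvElsewhere]
  | cons clq rest ih =>
      rw [List.foldl_cons]
      by_cases h : clq ≠ clique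
      · rw [if_pos h, ih]
        simp [pvElsewhere, PySem.Set.mem_update, List.contains_eq_mem, h, or_assoc]
      · rw [if_neg h, ih]
        simp only [ne_eq, not_not] at h
        simp [pvElsewhere, h]

theorem has_unique__spec_aux (clique : List Int) (graph : List (List Int)) :
    has_unique_ clique graph = has_unique__alt clique graph := by
  unfold has_unique_ has_unique__alt
  simp only [pvFoldA_eq, zero_add]
  have hle : clique.countP (pvElsewhere clique graph) ≤ clique.length :=
    List.countP_le_length
  have hmem : ∀ e, PySem.Set.contains
      (graph.foldl (fun s clq => if clq ≠ clique then PySem.Set.update s clq else s) PySem.Set.empty) e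
      = pvElsewhere clique graph e := by
    intro e
    have := pvOthers_mem clique graph PySem.Set.empty e
    simp only [PySem.Set.empty] at this
    simp only [PySem.Set.contains]
    by_cases h : pvElsewhere clique graph e <;> simp_all
  simp only [hmem]
  by_cases hall : ∀ e ∈ clique, pvElsewhere clique graph e = true
  · have h1 : clique.countP (pvElsewhere clique graph) = clique.length :=
      List.countP_eq_length.mpr hall
    have h2 : clique.any (fun e => !pvElsewhere clique graph e) = false := by
      simp only [List.any_eq_false]
      intro x hx
      simp [hall x hx]
    rw [h1, h2]
    simp
  · have h1 : clique.countP (pvElsewhere clique graph) ≠ clique.length :=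
      fun hc => hall (List.countP_eq_length.mp hc)
    have hlt : (clique.countP (pvElsewhere clique graph) : Int) < (clique.length : Int) := by
      have := lt_of_le_of_ne hle h1
      exact_mod_cast this
    have hne : (clique.countP (pvElsewhere clique graph) : Int) ≠ (clique.length : Int) := by
      exact_mod_cast h1
    have h2 : clique.any (fun e => !pvElsewhere clique graph e) = true := by
      simp only [List.any_eq_true, Bool.not_eq_true']
      push_neg at hall
      obtain ⟨e, he, hp⟩ := hall
      exact ⟨e, he, by simpa using hp⟩
    rw [h2, if_neg hne, if_pos hlt]

-- ===== VERDICT (by name: the statement is the Claim_ definition above) =====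
theorem has_unique__spec : Claim_equal_has_unique_ := by
  intro clique graph _
  unfold Spec_has_unique_
  exact has_unique__spec_aux clique graph
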